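-- pv_equiv track=rewrite | github.com/petrieh/robotcode | packages/runner/src/robotcode/runner/cli/discover/discover.py | _has_fast_discovery_unsupported_options
-- ===== SOURCE A (Python) =====
-- from typing import (
--     Any,
--     Dict,
--     Iterable,
--     List,
--     MutableMapping,
--     Optional,
--     Set,
--     Tuple,
--     Union,
-- )
--
-- _FAST_DISCOVERY_UNSUPPORTED_OPTION_PREFIXES = (
--     "--parser",
--     "--prerunmodifier",
--     "-PARSER",
-- )
--
-- def _has_fast_discovery_unsupported_options(cmd_options: List[str], robot_options_and_args: Tuple[str, ...]) -> Optional[str]: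
--     all_options = [*cmd_options, *robot_options_and_args]
--     for option in all_options:
--         option_l = option.lower()
--         if any(
--             option_l == prefix.lower() or option_l.startswith(f"{prefix.lower()}=")
--             for prefix in _FAST_DISCOVERY_UNSUPPORTED_OPTION_PREFIXES
--         ):
--             return option
--     return None
-- ===== SOURCE B (Python) =====
-- from typing import List, Optional, Tuple
--
-- _FAST_DISCOVERY_UNSUPPORTED_OPTION_PREFIXES = (
--     "--parser",
--     "--prerunmodifier",
--     "-PARSER",
-- )
--
--
-- def _has_fast_discovery_unsupported_options(cmd_options: List[str], robot_options_and_args: Tuple[str, ...]) -> Optional[str]: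
--     # Transposed traversal: one scan per unsupported prefix, keeping the
--     # earliest-matching (index, option) pair over all prefixes.
--     all_options = [*cmd_options, *robot_options_and_args]
--     best = None
--     for prefix in _FAST_DISCOVERY_UNSUPPORTED_OPTION_PREFIXES:
--         pl = prefix.lower()
--         for i, option in enumerate(all_options):
--             ol = option.lower()
--             if ol == pl or ol.startswith(pl + "="):
--                 if best is None or i < best[0]:
--                     best = (i, option)
--                 break
--     return best[1] if best is not None else None
-- ===== Notes on version B (the rewrite author's own statement) =====
-- stated objective: alternative
-- what changed: Transposes the loops: instead of scanning the options once with an inner any over the prefix tuple and returning on the first hit, B makes one scan per unsupported prefix (breaking at that prefix's first match) and keeps the (index, option) pair with the smallest index across prefixes, returning that option.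
import Mathlib
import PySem

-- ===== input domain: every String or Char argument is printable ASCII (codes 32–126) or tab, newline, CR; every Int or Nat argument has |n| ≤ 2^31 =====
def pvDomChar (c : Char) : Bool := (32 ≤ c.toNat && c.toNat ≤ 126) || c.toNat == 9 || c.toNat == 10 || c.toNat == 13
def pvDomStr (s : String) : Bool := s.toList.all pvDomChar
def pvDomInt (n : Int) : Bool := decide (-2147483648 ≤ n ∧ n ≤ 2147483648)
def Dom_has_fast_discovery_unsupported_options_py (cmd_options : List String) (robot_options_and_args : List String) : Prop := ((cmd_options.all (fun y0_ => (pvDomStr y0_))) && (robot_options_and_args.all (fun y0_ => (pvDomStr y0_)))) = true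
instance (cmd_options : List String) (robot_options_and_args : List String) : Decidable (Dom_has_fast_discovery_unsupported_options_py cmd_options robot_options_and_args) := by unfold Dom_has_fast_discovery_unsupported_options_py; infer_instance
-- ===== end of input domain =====

-- B transposes the loops: one scan per unsupported prefix (first match per prefix),
-- keeping the earliest-index match over all prefixes; objective: alternative (same cost).


-- ===== PORT A =====
def pvPrefixes : List String := ["--parser", "--prerunmodifier", "-PARSER"]

def pvFindA : List String → Option String
  | [] => none
  | option :: rest =>
    let option_l := PySem.Chars.lower option.toList
    if pvPrefixes.any (fun pfx =>
        option_l == PySem.Chars.lower pfx.toList ||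
        PySem.Chars.startswith option_l (PySem.Chars.lower pfx.toList ++ ['='])) then
      some option
    else pvFindA rest

def has_fast_discovery_unsupported_options_py (cmd_options : List String) (robot_options_and_args : List String) : Option String :=
  let all_options := cmd_options ++ robot_options_and_args
  pvFindA all_options

-- ===== PORT B =====
-- inner 'for i, option in enumerate(all_options): … break' → first match for one prefix
def pvFirstMatch (pl : List Char) : List (Int × String) → Option (Int × String)
  | [] => none
  | (i, option) :: rest =>
    let ol := PySem.Chars.lower option.toList
    if ol == pl || PySem.Chars.startswith ol (pl ++ ['=']) then some (i, option)
    else pvFirstMatch pl rest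

-- 'if best is None or i < best[0]: best = (i, option)'
def pvBetter (best : Option (Int × String)) (cand : Option (Int × String)) : Option (Int × String) :=
  match cand with
  | none => best
  | some (i, o) =>
    match best with
    | none => some (i, o)
    | some (j, o') => if i < j then some (i, o) else some (j, o')

def has_fast_discovery_unsupported_options_py_alt (cmd_options : List String) (robot_options_and_args : List String) : Option String :=
  let all_options := cmd_options ++ robot_options_and_args
  let best := pvPrefixes.foldl (fun best pfx =>
    pvBetter best (pvFirstMatch (PySem.Chars.lower pfx.toList) (PySem.List.enumerate all_options 0))) none
  best.map (·.2)

-- ===== PRECONDITION & SPEC =====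
def Spec_has_fast_discovery_unsupported_options_py (cmd_options : List String) (robot_options_and_args : List String) (out : Option String) : Prop := out = has_fast_discovery_unsupported_options_py_alt cmd_options robot_options_and_args
instance (cmd_options : List String) (robot_options_and_args : List String) (out : Option String) : Decidable (Spec_has_fast_discovery_unsupported_options_py cmd_options robot_options_and_args out) := by unfold Spec_has_fast_discovery_unsupported_options_py; infer_instance

-- ===== CLAIM (what is proved, stated in full; the proofs are below) =====
def Claim_equal_has_fast_discovery_unsupported_options_py : Prop := ∀ (cmd_options : List String) (robot_options_and_args : List String), Dom_has_fast_discovery_unsupported_options_py cmd_options robot_options_and_args → Spec_has_fast_discovery_unsupported_options_py cmd_options robot_options_and_args (has_fast_discovery_unsupported_options_py cmd_options robot_options_and_args)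

-- ===== LEMMAS AND PROOFS =====

theorem pv_firstMatch_ge (pl : List Char) : ∀ (l : List String) (k : Int) (i : Int) (o : String),
    pvFirstMatch pl (PySem.List.enumerate l k) = some (i, o) → k ≤ i := by
  intro l
  induction l with
  | nil => intro k i o h; simp [PySem.List.enumerate_nil, pvFirstMatch] at h
  | cons x rest ih =>
    intro k i o h
    rw [PySem.List.enumerate_cons] at h
    simp only [pvFirstMatch] at h
    split at h
    · cases h; exact le_refl _
    · have := ih (k + 1) i o h; omega

theorem pv_better_keep (k : Int) (o : String) (b : Option (Int × String))
    (hb : ∀ i o', b = some (i, o') → k ≤ i) :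
    pvBetter (some (k, o)) b = some (k, o) := by
  cases b with
  | none => rfl
  | some p =>
    obtain ⟨i, o'⟩ := p
    have hk := hb i o' rfl
    simp [pvBetter, not_lt.mpr hk]

theorem pv_better_take (k : Int) (o : String) (a : Option (Int × String))
    (ha : ∀ j o', a = some (j, o') → k < j) :
    pvBetter a (some (k, o)) = some (k, o) := by
  cases a with
  | none => rfl
  | some p =>
    obtain ⟨j, o'⟩ := p
    have hk := ha j o' rfl
    simp [pvBetter, hk]

theorem pv_better_high (k : Int) (a b : Option (Int × String))
    (ha : ∀ j o', a = some (j, o') → k < j)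
    (hb : ∀ i o', b = some (i, o') → k < i) :
    ∀ i o', pvBetter a b = some (i, o') → k < i := by
  intro i o' h
  rcases b with _ | ⟨i', o''⟩
  · exact ha i o' h
  · rcases a with _ | ⟨j, oj⟩
    · simp only [pvBetter] at h; cases h; exact hb _ _ rfl
    · simp only [pvBetter] at h
      split at h
      · cases h; exact hb _ _ rfl
      · cases h; exact ha _ _ rfl

theorem pv_main : ∀ (l : List String) (k : Int),
    (pvPrefixes.foldl (fun best pfx =>
        pvBetter best (pvFirstMatch (PySem.Chars.lower pfx.toList) (PySem.List.enumerate l k))) none).map (·.2)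
      = pvFindA l := by
  intro l
  induction l with
  | nil =>
    intro k
    simp [pvPrefixes, PySem.List.enumerate_nil, pvFirstMatch, pvBetter, pvFindA]
  | cons o rest ih =>
    intro k
    simp only [pvPrefixes, List.foldl, PySem.List.enumerate_cons, pvFirstMatch, pvFindA,
      List.any_cons, List.any_nil, Bool.or_false]
    set ol := PySem.Chars.lower o.toList with hol
    set p1 := PySem.Chars.lower "--parser".toList with hp1
    set p2 := PySem.Chars.lower "--prerunmodifier".toList with hp2
    set p3 := PySem.Chars.lower "-PARSER".toList with hp3
    set F1 := pvFirstMatch p1 (PySem.List.enumerate rest (k + 1)) with hF1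
    set F2 := pvFirstMatch p2 (PySem.List.enumerate rest (k + 1)) with hF2
    set F3 := pvFirstMatch p3 (PySem.List.enumerate rest (k + 1)) with hF3
    have g1 : ∀ i o', F1 = some (i, o') → k < i := by
      intro i o' h; have := pv_firstMatch_ge p1 rest (k+1) i o' (hF1 ▸ h); omega
    have g2 : ∀ i o', F2 = some (i, o') → k < i := by
      intro i o' h; have := pv_firstMatch_ge p2 rest (k+1) i o' (hF2 ▸ h); omega
    have g3 : ∀ i o', F3 = some (i, o') → k < i := by
      intro i o' h; have := pv_firstMatch_ge p3 rest (k+1) i o' (hF3 ▸ h); omega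
    by_cases t1 : (ol == p1 || PySem.Chars.startswith ol (p1 ++ ['='])) = true
    · -- first prefix matches at index k
      simp only [t1, if_true]
      have step1 : pvBetter none (some (k, o)) = some (k, o) := rfl
      rw [step1]
      have c2le : ∀ i o', (if (ol == p2 || PySem.Chars.startswith ol (p2 ++ ['='])) = true
          then some (k, o) else F2) = some (i, o') → k ≤ i := by
        intro i o' h; split at h
        · cases h; exact le_refl _
        · exact le_of_lt (g2 i o' h)
      rw [pv_better_keep k o _ c2le]
      have c3le : ∀ i o', (if (ol == p3 || PySem.Chars.startswith ol (p3 ++ ['='])) = true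
          then some (k, o) else F3) = some (i, o') → k ≤ i := by
        intro i o' h; split at h
        · cases h; exact le_refl _
        · exact le_of_lt (g3 i o' h)
      rw [pv_better_keep k o _ c3le]
      simp
    · simp only [t1, if_false, Bool.false_or, Bool.false_eq_true]
      by_cases t2 : (ol == p2 || PySem.Chars.startswith ol (p2 ++ ['='])) = true
      · simp only [t2, if_true]
        have step1 : pvBetter none F1 = F1 := by cases F1 <;> rfl
        rw [step1, pv_better_take k o F1 g1]
        have c3le : ∀ i o', (if (ol == p3 || PySem.Chars.startswith ol (p3 ++ ['='])) = true
            then some (k, o) else F3) = some (i, o') → k ≤ i := by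
          intro i o' h; split at h
          · cases h; exact le_refl _
          · exact le_of_lt (g3 i o' h)
        rw [pv_better_keep k o _ c3le]
        simp
      · simp only [t2, if_false, Bool.false_or, Bool.false_eq_true]
        by_cases t3 : (ol == p3 || PySem.Chars.startswith ol (p3 ++ ['='])) = true
        · simp only [t3, if_true]
          have step1 : pvBetter none F1 = F1 := by cases F1 <;> rfl
          rw [step1, pv_better_take k o (pvBetter F1 F2) (pv_better_high k F1 F2 g1 g2)]
          simp
        · simp only [t3, if_false, Bool.false_eq_true]
          have := ih (k + 1)
          simp only [pvPrefixes, List.foldl] at this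
          rw [← hol] at *
          simpa using this

-- ===== VERDICT (by name: the statement is the Claim_ definition above) =====
theorem has_fast_discovery_unsupported_options_py_spec : Claim_equal_has_fast_discovery_unsupported_options_py := by
  intro cmd robot _
  unfold Spec_has_fast_discovery_unsupported_options_py
  unfold has_fast_discovery_unsupported_options_py has_fast_discovery_unsupported_options_py_alt
  simpa using (pv_main (cmd ++ robot) 0).symm
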